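-- pv_equiv track=rewrite | github.com/zhupengjia/elsa_chatbot | src/reader/reader_dialog.py | _is_three_continuous_response
-- ===== SOURCE A (Python) =====
-- def _is_three_continuous_response(dialog_pairs):
--     """
--     Decide if the continuous three responses of the robot are the same.
--     :param dialog_pairs:
--     :return:
--     """
--     rtn = False
--     response_len = len(dialog_pairs)
--     for idx in range(response_len - 2):
--         three_responses = [dialog_pairs[idx][1], dialog_pairs[idx + 1][1], dialog_pairs[idx + 2][1]]
--         unique_len = len(list(set(three_responses)))
--         if unique_len == 1:
--             rtn = True
--             break
--     return rtn
-- ===== SOURCE B (Python) =====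
-- def _is_three_continuous_response(dialog_pairs):
--     """Single streaming pass with a run-length counter over the responses."""
--     responses = [resp for _, resp in dialog_pairs]
--     if not responses:
--         return False
--     prev = responses[0]
--     run = 1
--     for r in responses[1:]:
--         if r == prev:
--             run += 1
--             if run >= 3:
--                 return True
--         else:
--             run = 1
--         prev = r
--     return False
-- ===== Notes on version B (the rewrite author's own statement) =====
-- stated objective: alternative
-- what changed: Replaced the index-window loop that builds a 3-element set per window with a single streaming pass over the extracted responses that keeps a run-length counter and returns True the moment the run reaches 3.
import Mathlib
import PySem

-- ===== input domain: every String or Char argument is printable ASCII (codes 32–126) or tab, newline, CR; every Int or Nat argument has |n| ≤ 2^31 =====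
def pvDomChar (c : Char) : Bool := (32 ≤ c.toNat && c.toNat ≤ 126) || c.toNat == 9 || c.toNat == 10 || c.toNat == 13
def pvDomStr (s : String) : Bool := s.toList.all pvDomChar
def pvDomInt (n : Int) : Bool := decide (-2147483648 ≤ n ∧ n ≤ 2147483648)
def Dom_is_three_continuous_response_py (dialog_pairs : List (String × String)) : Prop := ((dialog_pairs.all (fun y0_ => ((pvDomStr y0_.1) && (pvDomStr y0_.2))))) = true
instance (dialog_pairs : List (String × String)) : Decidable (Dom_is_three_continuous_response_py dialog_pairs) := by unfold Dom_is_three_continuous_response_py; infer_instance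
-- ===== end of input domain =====

-- B replaces A's per-index windows (each building a 3-element set) with one streaming pass over the responses keeping a run-length counter (alternative decomposition, same asymptotic cost).

-- ===== PORT A =====
-- dialog_pairs[idx] for an index produced by the loop (always in range there); pyGet? is exact, the default is never used on loop indices
def pvAGet (dialog_pairs : List (String × String)) (i : Int) : String × String :=
  (PySem.List.pyGet? dialog_pairs i).getD ("", "")

-- the 'for idx in range(response_len - 2)' loop with its early break
def pvALoop (dialog_pairs : List (String × String)) : List Int → Bool
  | [] => false
  | idx :: rest =>
    let three_responses : List String :=
      [(pvAGet dialog_pairs idx).2, (pvAGet dialog_pairs (idx + 1)).2, (pvAGet dialog_pairs (idx + 2)).2]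
    let unique_len := (PySem.Set.ofList three_responses).length
    if unique_len = 1 then true else pvALoop dialog_pairs rest

def is_three_continuous_response_py (dialog_pairs : List (String × String)) : Bool :=
  pvALoop dialog_pairs (PySem.List.pyRange 0 ((dialog_pairs.length : Int) - 2) 1)

-- ===== PORT B =====
-- the streaming loop of Source B: prev = previous response, run = current run length
def pvBLoop (prev : String) (run : Nat) : List String → Bool
  | [] => false
  | r :: rest =>
    if r == prev then
      if run + 1 >= 3 then true else pvBLoop r (run + 1) rest
    else
      pvBLoop r 1 rest

def is_three_continuous_response_py_alt (dialog_pairs : List (String × String)) : Bool :=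
  match dialog_pairs.map Prod.snd with
  | [] => false
  | r :: rest => pvBLoop r 1 rest

-- ===== PRECONDITION & SPEC =====
def Spec_is_three_continuous_response_py (dialog_pairs : List (String × String)) (out : Bool) : Prop := out = is_three_continuous_response_py_alt dialog_pairs
instance (dialog_pairs : List (String × String)) (out : Bool) : Decidable (Spec_is_three_continuous_response_py dialog_pairs out) := by unfold Spec_is_three_continuous_response_py; infer_instance

-- ===== CLAIM (what is proved, stated in full; the proofs are below) =====
def Claim_equal_is_three_continuous_response_py : Prop := ∀ (dialog_pairs : List (String × String)), Dom_is_three_continuous_response_py dialog_pairs → Spec_is_three_continuous_response_py dialog_pairs (is_three_continuous_response_py dialog_pairs)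

-- ===== LEMMAS AND PROOFS =====

-- Common specification both ports are reduced to: some three consecutive responses are equal.
def hasThree : List String → Bool
  | a :: b :: c :: t => (a == b && b == c) || hasThree (b :: c :: t)
  | _ => false

-- A's window test: the 3-element set has one distinct element iff the three strings are equal
theorem set_three_len_one (a b c : String) :
    ((PySem.Set.ofList [a, b, c]).length = 1) ↔ (a = b ∧ b = c) := by
  by_cases hab : a = b <;> by_cases hbc : b = c <;> by_cases hac : a = c <;>
    · simp only [PySem.Set.ofList, PySem.Set.add, PySem.Set.contains, List.foldl]
      split_ifs <;> simp_all

-- A's window test at a Nat index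
def pvF (l : List (String × String)) (j : Nat) : Bool :=
  ((l[j]?.getD ("", "")).2 == (l[j+1]?.getD ("", "")).2) &&
  ((l[j+1]?.getD ("", "")).2 == (l[j+2]?.getD ("", "")).2)

theorem pvALoop_any (l : List (String × String)) (idxs : List Int) :
    pvALoop l idxs = idxs.any (fun i =>
      ((PySem.Set.ofList [(pvAGet l i).2, (pvAGet l (i+1)).2, (pvAGet l (i+2)).2]).length = 1 : Bool)) := by
  induction idxs with
  | nil => rfl
  | cons i rest ih => simp [pvALoop, ih]

theorem pvAGet_nat (l : List (String × String)) (j : Nat) :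
    pvAGet l (j : Int) = l[j]?.getD ("", "") := by
  simp [pvAGet, PySem.List.pyGet?_natCast]

theorem a_eq_nat (l : List (String × String)) :
    is_three_continuous_response_py l = (List.range (l.length - 2)).any (pvF l) := by
  unfold is_three_continuous_response_py
  rw [pvALoop_any, PySem.List.pyRange_one]
  simp only [sub_zero, List.any_map]
  have hlen : (((l.length : Int) - 2)).toNat = l.length - 2 := by omega
  rw [hlen]
  have hfun : ((fun i => ((PySem.Set.ofList [(pvAGet l i).2, (pvAGet l (i+1)).2, (pvAGet l (i+2)).2]).length = 1 : Bool)) ∘ (fun k : Nat => (0 : Int) + k)) = pvF l := by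
    funext j
    have h1 : ((0 : Int) + (j : Int)) = ((j : Nat) : Int) := by ring
    have h2 : ((j : Int) + 1) = ((j + 1 : Nat) : Int) := by push_cast; ring
    have h3 : ((j : Int) + 2) = ((j + 2 : Nat) : Int) := by push_cast; ring
    simp only [Function.comp, h1, h2, h3, pvAGet_nat]
    rw [Bool.eq_iff_iff]
    simp [set_three_len_one, pvF]
  rw [hfun]

theorem nat_eq_hasThree : ∀ (l : List (String × String)),
    (List.range (l.length - 2)).any (pvF l) = hasThree (l.map Prod.snd)
  | [] => rfl
  | [_] => rfl
  | [_, _] => rfl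
  | a :: b :: c :: t => by
    have ih := nat_eq_hasThree (b :: c :: t)
    simp only [List.length_cons]
    have hstep : t.length + 1 + 1 + 1 - 2 = (t.length + 1 + 1 - 2) + 1 := by omega
    rw [hstep, List.range_succ_eq_map]
    simp only [List.any_cons, List.any_map]
    have hshift : (pvF (a :: b :: c :: t) ∘ Nat.succ) = pvF (b :: c :: t) := by
      funext j; simp [pvF, Function.comp]
    rw [hshift]
    simp only [List.length_cons] at ih
    rw [ih]
    simp [pvF, hasThree]
termination_by l => l.length

-- skipping a non-matching head preserves hasThree
theorem hasThree_cons_ne (r c : String) (t : List String) (h : (r == c) = false) :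
    hasThree (r :: c :: t) = hasThree (c :: t) := by
  cases t <;> simp [hasThree, h]

-- B's loop in its two reachable counter states (run = 1 and run = 2)
theorem bLoop_spec : ∀ (l : List String) (prev : String),
    (pvBLoop prev 1 l = hasThree (prev :: l)) ∧
    (pvBLoop prev 2 l = (match l with
       | [] => false
       | c :: rest => (c == prev) || hasThree (c :: rest))) := by
  intro l
  induction l with
  | nil => intro prev; simp [pvBLoop, hasThree]
  | cons r rest ih =>
    intro prev
    constructor
    · show pvBLoop prev 1 (r :: rest) = hasThree (prev :: r :: rest)
      simp only [pvBLoop]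
      by_cases h : r = prev
      · subst h
        simp only [beq_self_eq_true, if_true, Nat.reduceAdd]
        rw [if_neg (by omega), (ih r).2]
        cases rest with
        | nil => simp [hasThree]
        | cons c rest' =>
          by_cases hcr : c = r
          · subst hcr; simp [hasThree]
          · have hne : (c == r) = false := by simp [hcr]
            have hne' : (r == c) = false := by
              simp only [beq_eq_false_iff_ne]; exact fun h => hcr h.symm
            simp only [hne, Bool.false_or, hasThree, beq_self_eq_true, Bool.true_and, hne']
            rw [hasThree_cons_ne r c rest' hne']
      · have hne : (r == prev) = false := by simp [h]
        have hne' : (prev == r) = false := by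
          simp only [beq_eq_false_iff_ne]; exact Ne.symm h
        rw [hne, if_neg (by simp), (ih r).1, hasThree_cons_ne prev r rest hne']
    · show pvBLoop prev 2 (r :: rest) = _
      simp only [pvBLoop]
      by_cases h : r = prev
      · subst h; simp
      · have hne : (r == prev) = false := by simp [h]
        rw [hne, if_neg (by simp), (ih r).1]
        simp

theorem alt_eq_hasThree (l : List (String × String)) :
    is_three_continuous_response_py_alt l = hasThree (l.map Prod.snd) := by
  unfold is_three_continuous_response_py_alt
  cases hm : l.map Prod.snd with
  | nil => rfl
  | cons r rest => exact (bLoop_spec rest r).1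

-- ===== VERDICT (by name: the statement is the Claim_ definition above) =====
theorem is_three_continuous_response_py_spec : Claim_equal_is_three_continuous_response_py := by
  intro l _
  show is_three_continuous_response_py l = is_three_continuous_response_py_alt l
  rw [a_eq_nat, nat_eq_hasThree, alt_eq_hasThree]
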